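-- pv_equiv track=rewrite | github.com/lishuwnc/Kickstart-Framework-Python | G2017.py | solveGC2017
-- ===== SOURCE A (Python) =====
-- def solveGC2017(n, m, grid):
--     t = [[[[0] * m for _ in range(n)] for _ in range(m)] for _ in range(n)]
--     minimum = [[[[2 ** 31] * m for _ in range(n)] for _ in range(m)] for _ in range(n)]
--     for i in range(n):
--         for j in range(m):
--             minimum[i][j][0][0] = grid[i][j]
--     for k1 in range(n):
--         for k2 in range(m):
--             for i in range(n - k1):
--                 for j in range(m - k2):
--                     if k1 == 0 and k2 == 0:
--                         continue
--                     if k1 == 0: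
--                         minimum[i][j][k1][k2] = min(minimum[i][j][k1][k2 - 1], grid[i][j + k2])
--                     elif k2 == 0:
--                         minimum[i][j][k1][k2] = min(minimum[i][j][k1 - 1][k2], grid[i + k1][j])
--                     else:
--                         minimum[i][j][k1][k2] = min(minimum[i][j][k1 - 1][k2], minimum[i][j][k1][k2 - 1], grid[i + k1][j + k2])
--     for k1 in range(n):
--         for k2 in range(m):
--             for i in range(n - k1):
--                 for j in range(m - k2):
--                     for x in range(k1):
--                         t[i][j][k1][k2] = max(t[i][j][k1][k2], t[i][j][x][k2] + t[i + x + 1][j][k1 - x - 1][k2])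
--                     for x in range(k2):
--                         t[i][j][k1][k2] = max(t[i][j][k1][k2], t[i][j][k1][x] + t[i][j + x + 1][k1][k2 - x - 1])
--                     if k1 > 0 or k2 > 0:
--                         t[i][j][k1][k2] += minimum[i][j][k1][k2]
--     return t[0][0][n - 1][m - 1]
-- ===== SOURCE B (Python) =====
-- def solveGC2017(n, m, grid):
--     mmemo = {}
--
--     def rmin(i, j, k1, k2):
--         key = (i, j, k1, k2)
--         if key in mmemo:
--             return mmemo[key]
--         if k1 == 0 and k2 == 0:
--             v = grid[i][j]
--         elif k1 == 0:
--             v = min(rmin(i, j, 0, k2 - 1), grid[i][j + k2])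
--         elif k2 == 0:
--             v = min(rmin(i, j, k1 - 1, 0), grid[i + k1][j])
--         else:
--             v = min(rmin(i, j, k1 - 1, k2), rmin(i, j, k1, k2 - 1), grid[i + k1][j + k2])
--         mmemo[key] = v
--         return v
--
--     bmemo = {}
--
--     def best(i, j, k1, k2):
--         key = (i, j, k1, k2)
--         if key in bmemo:
--             return bmemo[key]
--         v = 0
--         for x in range(k1):
--             v = max(v, best(i, j, x, k2) + best(i + x + 1, j, k1 - x - 1, k2))
--         for x in range(k2):
--             v = max(v, best(i, j, k1, x) + best(i, j + x + 1, k1, k2 - x - 1))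
--         if k1 > 0 or k2 > 0:
--             v += rmin(i, j, k1, k2)
--         bmemo[key] = v
--         return v
--
--     return best(0, 0, n - 1, m - 1)
-- ===== Notes on version B (the rewrite author's own statement) =====
-- stated objective: alternative
-- what changed: Replaced the bottom-up quadruple loops filling 4D tables by top-down memoized recursions best/rmin over subrectangles, keyed by (i,j,k1,k2) in dicts; the 2**31 sentinel and the tables disappear.
import Mathlib
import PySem

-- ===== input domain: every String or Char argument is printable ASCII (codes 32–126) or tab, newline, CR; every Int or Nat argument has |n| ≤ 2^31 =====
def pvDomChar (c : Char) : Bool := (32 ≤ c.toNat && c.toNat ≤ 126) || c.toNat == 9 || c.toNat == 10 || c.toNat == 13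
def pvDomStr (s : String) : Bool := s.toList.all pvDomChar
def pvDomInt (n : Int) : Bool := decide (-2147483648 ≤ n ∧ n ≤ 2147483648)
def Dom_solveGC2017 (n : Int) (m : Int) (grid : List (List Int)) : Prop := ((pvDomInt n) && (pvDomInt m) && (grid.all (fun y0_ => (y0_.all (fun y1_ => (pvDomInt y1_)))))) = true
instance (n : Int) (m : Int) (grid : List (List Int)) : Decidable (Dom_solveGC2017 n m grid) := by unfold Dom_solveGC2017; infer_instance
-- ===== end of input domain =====

-- B replaces A's bottom-up quadruple loops over 4D tables by top-down memoized
-- recursions over subrectangles (objective: alternative decomposition, same cost).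

-- grid[i][j] (indices always in range on admitted inputs; default 0 out of range)
def pvG (grid : List (List Int)) (i j : Nat) : Int := (grid.getD i []).getD j 0

-- ===== PORT A =====
-- t[i][j][k1][k2] read/write helpers for the 4D nested-list tables
def pvGet4 (t : List (List (List (List Int)))) (i j k1 k2 : Nat) : Int :=
  (((t.getD i []).getD j []).getD k1 []).getD k2 0

def pvSet4 (t : List (List (List (List Int)))) (i j k1 k2 : Nat) (v : Int) :
    List (List (List (List Int))) :=
  t.modify i (fun a => a.modify j (fun b => b.modify k1 (fun c => c.set k2 v)))

-- `minimum` after the first double loop (grid written into the [0][0] cells)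
def pvMin0 (grid : List (List Int)) (N M : Nat) : List (List (List (List Int))) :=
  (List.range N).foldl
    (fun t i => (List.range M).foldl (fun t j => pvSet4 t i j 0 0 (pvG grid i j)) t)
    (List.replicate N (List.replicate M (List.replicate N (List.replicate M ((2:Int)^31)))))

-- `minimum` after the quadruple min-loop
def pvMinTab (grid : List (List Int)) (N M : Nat) : List (List (List (List Int))) :=
  (List.range N).foldl (fun t k1 =>
    (List.range M).foldl (fun t k2 =>
      (List.range (N - k1)).foldl (fun t i =>
        (List.range (M - k2)).foldl (fun t j =>
          if k1 = 0 ∧ k2 = 0 then t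
          else if k1 = 0 then
            pvSet4 t i j k1 k2 (min (pvGet4 t i j k1 (k2-1)) (pvG grid i (j+k2)))
          else if k2 = 0 then
            pvSet4 t i j k1 k2 (min (pvGet4 t i j (k1-1) k2) (pvG grid (i+k1) j))
          else
            pvSet4 t i j k1 k2 (min (min (pvGet4 t i j (k1-1) k2) (pvGet4 t i j k1 (k2-1)))
              (pvG grid (i+k1) (j+k2)))) t) t) t) (pvMin0 grid N M)

-- `t` after the quadruple max-loop (mn is the finished `minimum` table)
def pvTTab (grid : List (List Int)) (N M : Nat) (mn : List (List (List (List Int)))) :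
    List (List (List (List Int))) :=
  (List.range N).foldl (fun t k1 =>
    (List.range M).foldl (fun t k2 =>
      (List.range (N - k1)).foldl (fun t i =>
        (List.range (M - k2)).foldl (fun t j =>
          let t1 := (List.range k1).foldl (fun t x =>
            pvSet4 t i j k1 k2 (max (pvGet4 t i j k1 k2)
              (pvGet4 t i j x k2 + pvGet4 t (i+x+1) j (k1-x-1) k2))) t
          let t2 := (List.range k2).foldl (fun t x =>
            pvSet4 t i j k1 k2 (max (pvGet4 t i j k1 k2)
              (pvGet4 t i j k1 x + pvGet4 t i (j+x+1) k1 (k2-x-1)))) t1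
          if 0 < k1 ∨ 0 < k2 then
            pvSet4 t2 i j k1 k2 (pvGet4 t2 i j k1 k2 + pvGet4 mn i j k1 k2)
          else t2) t) t) t)
    (List.replicate N (List.replicate M (List.replicate N (List.replicate M (0:Int)))))

def solveGC2017 (n : Int) (m : Int) (grid : List (List Int)) : Int :=
  pvGet4 (pvTTab grid n.toNat m.toNat (pvMinTab grid n.toNat m.toNat)) 0 0
    (n.toNat - 1) (m.toNat - 1)

-- ===== PORT B =====
-- memoized recursion rmin (memo dict threaded through; fuel makes it structural,
-- always called with fuel > k1+k2 so the 0 case is never reached)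
def pvAltRmin (grid : List (List Int)) :
    Nat → PySem.Dict (Nat × Nat × Nat × Nat) Int → Nat → Nat → Nat → Nat →
    Int × PySem.Dict (Nat × Nat × Nat × Nat) Int
  | 0, mm, _, _, _, _ => (0, mm)
  | f+1, mm, i, j, k1, k2 =>
    match mm.get? (i, j, k1, k2) with
    | some v => (v, mm)
    | none =>
      let r :=
        if k1 = 0 ∧ k2 = 0 then (pvG grid i j, mm)
        else if k1 = 0 then
          let r1 := pvAltRmin grid f mm i j 0 (k2-1)
          (min r1.1 (pvG grid i (j+k2)), r1.2)
        else if k2 = 0 then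
          let r1 := pvAltRmin grid f mm i j (k1-1) 0
          (min r1.1 (pvG grid (i+k1) j), r1.2)
        else
          let r1 := pvAltRmin grid f mm i j (k1-1) k2
          let r2 := pvAltRmin grid f r1.2 i j k1 (k2-1)
          (min (min r1.1 r2.1) (pvG grid (i+k1) (j+k2)), r2.2)
      (r.1, r.2.insert (i, j, k1, k2) r.1)

-- memoized recursion best (best-memo and rmin-memo threaded through)
def pvAltBest (grid : List (List Int)) :
    Nat → PySem.Dict (Nat × Nat × Nat × Nat) Int → PySem.Dict (Nat × Nat × Nat × Nat) Int →
    Nat → Nat → Nat → Nat →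
    Int × PySem.Dict (Nat × Nat × Nat × Nat) Int × PySem.Dict (Nat × Nat × Nat × Nat) Int
  | 0, bm, mm, _, _, _, _ => (0, bm, mm)
  | f+1, bm, mm, i, j, k1, k2 =>
    match bm.get? (i, j, k1, k2) with
    | some v => (v, bm, mm)
    | none =>
      let s1 := (List.range k1).foldl (fun s x =>
        let a := pvAltBest grid f s.2.1 s.2.2 i j x k2
        let b := pvAltBest grid f a.2.1 a.2.2 (i+x+1) j (k1-x-1) k2
        (max s.1 (a.1 + b.1), b.2.1, b.2.2)) ((0:Int), bm, mm)
      let s2 := (List.range k2).foldl (fun s x =>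
        let a := pvAltBest grid f s.2.1 s.2.2 i j k1 x
        let b := pvAltBest grid f a.2.1 a.2.2 i (j+x+1) k1 (k2-x-1)
        (max s.1 (a.1 + b.1), b.2.1, b.2.2)) s1
      let r :=
        if 0 < k1 ∨ 0 < k2 then
          let rm := pvAltRmin grid (k1+k2+1) s2.2.2 i j k1 k2
          (s2.1 + rm.1, rm.2)
        else (s2.1, s2.2.2)
      (r.1, s2.2.1.insert (i, j, k1, k2) r.1, r.2)

def solveGC2017_alt (n : Int) (m : Int) (grid : List (List Int)) : Int :=
  (pvAltBest grid ((n.toNat - 1) + (m.toNat - 1) + 1) PySem.Dict.empty PySem.Dict.empty 0 0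
    (n.toNat - 1) (m.toNat - 1)).1

-- ===== PRECONDITION & SPEC =====
-- Pre_ excludes exactly the inputs where Python A raises (IndexError): n < 1 or
-- m < 1 (empty table indexing), or grid lacking n rows of at least m entries.
def Pre_solveGC2017 (n : Int) (m : Int) (grid : List (List Int)) : Prop :=
  1 ≤ n ∧ 1 ≤ m ∧ n.toNat ≤ grid.length ∧
  ∀ row ∈ grid.take n.toNat, m.toNat ≤ row.length
instance (n : Int) (m : Int) (grid : List (List Int)) : Decidable (Pre_solveGC2017 n m grid) := by
  unfold Pre_solveGC2017; infer_instance

def pvWitness_solveGC2017 : Int × Int × List (List Int) := (2, 2, [[1, 2], [3, 4]])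

def Spec_solveGC2017 (n : Int) (m : Int) (grid : List (List Int)) (out : Int) : Prop :=
  out = solveGC2017_alt n m grid
instance (n : Int) (m : Int) (grid : List (List Int)) (out : Int) :
    Decidable (Spec_solveGC2017 n m grid out) := by unfold Spec_solveGC2017; infer_instance

-- ===== CLAIM (what is proved, stated in full; the proofs are below) =====
def Claim_equal_solveGC2017 : Prop := ∀ (n : Int) (m : Int) (grid : List (List Int)), Dom_solveGC2017 n m grid → Pre_solveGC2017 n m grid → Spec_solveGC2017 n m grid (solveGC2017 n m grid)


-- ===== LEMMAS AND PROOFS =====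

-- ---- the common mathematical recurrence both programs compute ----

def rminF (g : Nat → Nat → Int) : Nat → Nat → Nat → Nat → Nat → Int
  | 0, _, _, _, _ => 0
  | f+1, i, j, k1, k2 =>
    if k1 = 0 ∧ k2 = 0 then g i j
    else if k1 = 0 then min (rminF g f i j 0 (k2-1)) (g i (j+k2))
    else if k2 = 0 then min (rminF g f i j (k1-1) 0) (g (i+k1) j)
    else min (min (rminF g f i j (k1-1) k2) (rminF g f i j k1 (k2-1))) (g (i+k1) (j+k2))

def rminS (g : Nat → Nat → Int) (i j k1 k2 : Nat) : Int := rminF g (k1+k2+1) i j k1 k2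

def bestF (g : Nat → Nat → Int) : Nat → Nat → Nat → Nat → Nat → Int
  | 0, _, _, _, _ => 0
  | f+1, i, j, k1, k2 =>
    if 0 < k1 ∨ 0 < k2 then
      ((List.range k2).foldl
        (fun v x => max v (bestF g f i j k1 x + bestF g f i (j+x+1) k1 (k2-x-1)))
        ((List.range k1).foldl
          (fun v x => max v (bestF g f i j x k2 + bestF g f (i+x+1) j (k1-x-1) k2)) 0))
        + rminS g i j k1 k2
    else
      ((List.range k2).foldl
        (fun v x => max v (bestF g f i j k1 x + bestF g f i (j+x+1) k1 (k2-x-1)))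
        ((List.range k1).foldl
          (fun v x => max v (bestF g f i j x k2 + bestF g f (i+x+1) j (k1-x-1) k2)) 0))

def bestS (g : Nat → Nat → Int) (i j k1 k2 : Nat) : Int := bestF g (k1+k2+1) i j k1 k2

lemma foldl_range_congr {β : Type} (f f' : β → Nat → β) (nn : Nat)
    (h : ∀ v x, x < nn → f v x = f' v x) :
    ∀ a, (List.range nn).foldl f a = (List.range nn).foldl f' a := by
  induction nn with
  | zero => intro a; rfl
  | succ n ih =>
    intro a
    rw [List.range_succ, List.foldl_append, List.foldl_append]
    simp only [List.foldl_cons, List.foldl_nil]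
    rw [ih (fun v x hx => h v x (by omega)) a, h _ n (by omega)]

lemma range_foldl_inv {σ : Type} (P : Nat → σ → Prop) (f : σ → Nat → σ) :
    ∀ (nn : Nat), (∀ x s, x < nn → P x s → P (x+1) (f s x)) →
    ∀ s, P 0 s → P nn ((List.range nn).foldl f s) := by
  intro nn
  induction nn with
  | zero => intro _ s h0; exact h0
  | succ n ih =>
    intro h s h0
    rw [List.range_succ, List.foldl_append]
    simp only [List.foldl_cons, List.foldl_nil]
    exact h n _ (by omega) (ih (fun x s hx => h x s (by omega)) s h0)

lemma rminF_congr (g : Nat → Nat → Int) :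
    ∀ s f f' i j k1 k2, k1 + k2 ≤ s → k1 + k2 < f → k1 + k2 < f' →
    rminF g f i j k1 k2 = rminF g f' i j k1 k2 := by
  intro s
  induction s with
  | zero =>
    intro f f' i j k1 k2 hs hf hf'
    have hk1 : k1 = 0 := by omega
    have hk2 : k2 = 0 := by omega
    cases f with
    | zero => omega
    | succ fa =>
      cases f' with
      | zero => omega
      | succ fb => subst hk1; subst hk2; simp [rminF]
  | succ s ih =>
    intro f f' i j k1 k2 hs hf hf'
    cases f with
    | zero => omega
    | succ fa =>
      cases f' with
      | zero => omega
      | succ fb =>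
        simp only [rminF]
        by_cases h0 : k1 = 0 ∧ k2 = 0
        · simp [h0]
        · by_cases h1 : k1 = 0
          · have hk2 : k2 ≠ 0 := fun h => h0 ⟨h1, h⟩
            simp only [h0, h1, if_false, if_true, eq_self_iff_true]
            rw [ih fa fb i j 0 (k2-1) (by omega) (by omega) (by omega)]
          · by_cases h2 : k2 = 0
            · simp only [h0, h1, h2, if_false, if_true, eq_self_iff_true]
              rw [ih fa fb i j (k1-1) 0 (by omega) (by omega) (by omega)]
            · simp only [h0, h1, h2, if_false]
              rw [ih fa fb i j (k1-1) k2 (by omega) (by omega) (by omega),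
                ih fa fb i j k1 (k2-1) (by omega) (by omega) (by omega)]

lemma rminS_unfold (g : Nat → Nat → Int) (i j k1 k2 : Nat) :
    rminS g i j k1 k2 =
      if k1 = 0 ∧ k2 = 0 then g i j
      else if k1 = 0 then min (rminS g i j 0 (k2-1)) (g i (j+k2))
      else if k2 = 0 then min (rminS g i j (k1-1) 0) (g (i+k1) j)
      else min (min (rminS g i j (k1-1) k2) (rminS g i j k1 (k2-1))) (g (i+k1) (j+k2)) := by
  have step : rminF g (k1+k2+1) i j k1 k2 =
      (if k1 = 0 ∧ k2 = 0 then g i j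
      else if k1 = 0 then min (rminF g (k1+k2) i j 0 (k2-1)) (g i (j+k2))
      else if k2 = 0 then min (rminF g (k1+k2) i j (k1-1) 0) (g (i+k1) j)
      else min (min (rminF g (k1+k2) i j (k1-1) k2) (rminF g (k1+k2) i j k1 (k2-1)))
        (g (i+k1) (j+k2))) := rfl
  show rminF g (k1+k2+1) i j k1 k2 = _
  rw [step]
  by_cases h0 : k1 = 0 ∧ k2 = 0
  · rw [if_pos h0, if_pos h0]
  · rw [if_neg h0, if_neg h0]
    by_cases h1 : k1 = 0
    · rw [if_pos h1, if_pos h1]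
      have c1 : rminF g (k1+k2) i j 0 (k2-1) = rminS g i j 0 (k2-1) := by
        have hk2 : k2 ≠ 0 := fun h => h0 ⟨h1, h⟩
        exact rminF_congr g (k1+k2) (k1+k2) (0+(k2-1)+1) i j 0 (k2-1)
          (by omega) (by omega) (by omega)
      rw [c1]
    · rw [if_neg h1, if_neg h1]
      by_cases h2 : k2 = 0
      · rw [if_pos h2, if_pos h2]
        have c1 : rminF g (k1+k2) i j (k1-1) 0 = rminS g i j (k1-1) 0 :=
          rminF_congr g (k1+k2) (k1+k2) ((k1-1)+0+1) i j (k1-1) 0 (by omega) (by omega) (by omega)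
        rw [c1]
      · rw [if_neg h2, if_neg h2]
        have c1 : rminF g (k1+k2) i j (k1-1) k2 = rminS g i j (k1-1) k2 :=
          rminF_congr g (k1+k2) (k1+k2) ((k1-1)+k2+1) i j (k1-1) k2 (by omega) (by omega) (by omega)
        have c2 : rminF g (k1+k2) i j k1 (k2-1) = rminS g i j k1 (k2-1) :=
          rminF_congr g (k1+k2) (k1+k2) (k1+(k2-1)+1) i j k1 (k2-1) (by omega) (by omega) (by omega)
        rw [c1, c2]

lemma bestF_congr (g : Nat → Nat → Int) :
    ∀ s f f' i j k1 k2, k1 + k2 ≤ s → k1 + k2 < f → k1 + k2 < f' →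
    bestF g f i j k1 k2 = bestF g f' i j k1 k2 := by
  intro s
  induction s with
  | zero =>
    intro f f' i j k1 k2 hs hf hf'
    have hk1 : k1 = 0 := by omega
    have hk2 : k2 = 0 := by omega
    cases f with
    | zero => omega
    | succ fa =>
      cases f' with
      | zero => omega
      | succ fb => subst hk1; subst hk2; simp [bestF]
  | succ s ih =>
    intro f f' i j k1 k2 hs hf hf'
    cases f with
    | zero => omega
    | succ fa =>
      cases f' with
      | zero => omega
      | succ fb =>
        simp only [bestF]
        have e1 : (List.range k1).foldl
            (fun v x => max v (bestF g fa i j x k2 + bestF g fa (i+x+1) j (k1-x-1) k2)) 0 =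
          (List.range k1).foldl
            (fun v x => max v (bestF g fb i j x k2 + bestF g fb (i+x+1) j (k1-x-1) k2)) 0 := by
          refine foldl_range_congr _ _ k1 (fun v x hx => ?_) 0
          rw [ih fa fb i j x k2 (by omega) (by omega) (by omega),
            ih fa fb (i+x+1) j (k1-x-1) k2 (by omega) (by omega) (by omega)]
        rw [e1]
        have e2 : ∀ a : Int, (List.range k2).foldl
            (fun v x => max v (bestF g fa i j k1 x + bestF g fa i (j+x+1) k1 (k2-x-1))) a =
          (List.range k2).foldl
            (fun v x => max v (bestF g fb i j k1 x + bestF g fb i (j+x+1) k1 (k2-x-1))) a := by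
          refine foldl_range_congr _ _ k2 (fun v x hx => ?_)
          rw [ih fa fb i j k1 x (by omega) (by omega) (by omega),
            ih fa fb i (j+x+1) k1 (k2-x-1) (by omega) (by omega) (by omega)]
        rw [e2]

lemma bestS_unfold (g : Nat → Nat → Int) (i j k1 k2 : Nat) :
    bestS g i j k1 k2 =
      (if 0 < k1 ∨ 0 < k2 then
        ((List.range k2).foldl
          (fun v x => max v (bestS g i j k1 x + bestS g i (j+x+1) k1 (k2-x-1)))
          ((List.range k1).foldl
            (fun v x => max v (bestS g i j x k2 + bestS g (i+x+1) j (k1-x-1) k2)) 0))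
          + rminS g i j k1 k2
      else
        ((List.range k2).foldl
          (fun v x => max v (bestS g i j k1 x + bestS g i (j+x+1) k1 (k2-x-1)))
          ((List.range k1).foldl
            (fun v x => max v (bestS g i j x k2 + bestS g (i+x+1) j (k1-x-1) k2)) 0))) := by
  have e1 : (List.range k1).foldl
      (fun v x => max v (bestF g (k1+k2) i j x k2 + bestF g (k1+k2) (i+x+1) j (k1-x-1) k2)) 0 =
    (List.range k1).foldl
      (fun v x => max v (bestS g i j x k2 + bestS g (i+x+1) j (k1-x-1) k2)) 0 := by
    refine foldl_range_congr _ _ k1 (fun v x hx => ?_) 0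
    rw [bestF_congr g (k1+k2) (k1+k2) (x+k2+1) i j x k2 (by omega) (by omega) (by omega),
      bestF_congr g (k1+k2) (k1+k2) ((k1-x-1)+k2+1) (i+x+1) j (k1-x-1) k2
        (by omega) (by omega) (by omega)]
    rfl
  have e2 : ∀ a : Int, (List.range k2).foldl
      (fun v x => max v (bestF g (k1+k2) i j k1 x + bestF g (k1+k2) i (j+x+1) k1 (k2-x-1))) a =
    (List.range k2).foldl
      (fun v x => max v (bestS g i j k1 x + bestS g i (j+x+1) k1 (k2-x-1))) a := by
    refine foldl_range_congr _ _ k2 (fun v x hx => ?_)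
    rw [bestF_congr g (k1+k2) (k1+k2) (k1+x+1) i j k1 x (by omega) (by omega) (by omega),
      bestF_congr g (k1+k2) (k1+k2) (k1+(k2-x-1)+1) i (j+x+1) k1 (k2-x-1)
        (by omega) (by omega) (by omega)]
    rfl
  have step : bestF g (k1+k2+1) i j k1 k2 =
      (if 0 < k1 ∨ 0 < k2 then
        ((List.range k2).foldl
          (fun v x => max v (bestF g (k1+k2) i j k1 x + bestF g (k1+k2) i (j+x+1) k1 (k2-x-1)))
          ((List.range k1).foldl
            (fun v x => max v (bestF g (k1+k2) i j x k2 + bestF g (k1+k2) (i+x+1) j (k1-x-1) k2))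
            0)) + rminS g i j k1 k2
      else
        ((List.range k2).foldl
          (fun v x => max v (bestF g (k1+k2) i j k1 x + bestF g (k1+k2) i (j+x+1) k1 (k2-x-1)))
          ((List.range k1).foldl
            (fun v x => max v (bestF g (k1+k2) i j x k2 + bestF g (k1+k2) (i+x+1) j (k1-x-1) k2))
            0))) := rfl
  show bestF g (k1+k2+1) i j k1 k2 = _
  rw [step, e1, e2 _]

-- ---- nested-list table lemmas ----

def Sh4 (N M : Nat) (t : List (List (List (List Int)))) : Prop :=
  t.length = N ∧ ∀ i < N, (t.getD i []).length = M ∧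
    ∀ j < M, ((t.getD i []).getD j []).length = N ∧
      ∀ k < N, (((t.getD i []).getD j []).getD k []).length = M

lemma getD_modify {α : Type} (d : α) (f : α → α) (l : List α) (i i' : Nat) :
    (l.modify i f).getD i' d =
      if i = i' ∧ i < l.length then f (l.getD i' d) else l.getD i' d := by
  rw [List.getD_eq_getElem?_getD, List.getD_eq_getElem?_getD, List.getElem?_modify]
  by_cases h : i = i'
  · subst h
    by_cases hl : i < l.length
    · rw [List.getElem?_eq_getElem hl]
      simp [hl]
    · rw [List.getElem?_eq_none (by omega)]
      simp [hl]
  · cases hx : l[i']? <;> simp [h]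

lemma getD_set {α : Type} (l : List α) (i : Nat) (a : α) (i' : Nat) (d : α) :
    (l.set i a).getD i' d =
      if i = i' ∧ i < l.length then a else l.getD i' d := by
  rw [List.getD_eq_getElem?_getD, List.getD_eq_getElem?_getD, List.getElem?_set]
  by_cases h : i = i'
  · subst h
    by_cases hl : i < l.length
    · simp [hl]
    · rw [List.getElem?_eq_none (by omega)]
      simp [hl]
  · simp [h]

lemma pvGet4_set4_ne (t : List (List (List (List Int)))) (v : Int)
    {i j k1 k2 i' j' k1' k2' : Nat}
    (h : ¬ (i = i' ∧ j = j' ∧ k1 = k1' ∧ k2 = k2')) :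
    pvGet4 (pvSet4 t i j k1 k2 v) i' j' k1' k2' = pvGet4 t i' j' k1' k2' := by
  simp only [pvGet4, pvSet4]
  rw [getD_modify]
  split_ifs with c1
  · obtain ⟨e1, _⟩ := c1
    subst e1
    rw [getD_modify]
    split_ifs with c2
    · obtain ⟨e2, _⟩ := c2
      subst e2
      rw [getD_modify]
      split_ifs with c3
      · obtain ⟨e3, _⟩ := c3
        subst e3
        rw [getD_set]
        split_ifs with c4
        · exact absurd ⟨rfl, rfl, rfl, c4.1⟩ h
        · rfl
      · rfl
    · rfl
  · rfl

lemma pvGet4_set4_self {N M : Nat} (t : List (List (List (List Int)))) (v : Int)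
    {i j k1 k2 : Nat} (hsh : Sh4 N M t)
    (hi : i < N) (hj : j < M) (hk1 : k1 < N) (hk2 : k2 < M) :
    pvGet4 (pvSet4 t i j k1 k2 v) i j k1 k2 = v := by
  obtain ⟨hlen, hrow⟩ := hsh
  have h1 : i < t.length := by omega
  have h2 := (hrow i hi).1
  have h3 := ((hrow i hi).2 j hj).1
  have h4 := ((hrow i hi).2 j hj).2 k1 hk1
  simp only [pvGet4, pvSet4]
  rw [getD_modify, if_pos ⟨rfl, h1⟩, getD_modify, if_pos ⟨rfl, by omega⟩,
    getD_modify, if_pos ⟨rfl, by omega⟩, getD_set, if_pos ⟨rfl, by omega⟩]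

lemma Sh4_set4 {N M : Nat} {t : List (List (List (List Int)))} (hsh : Sh4 N M t)
    (i j k1 k2 : Nat) (v : Int) : Sh4 N M (pvSet4 t i j k1 k2 v) := by
  obtain ⟨hlen, hrow⟩ := hsh
  refine ⟨by simpa [pvSet4, List.length_modify] using hlen, ?_⟩
  intro i' hi'
  simp only [pvSet4, getD_modify]
  split_ifs with ha
  · refine ⟨by simpa [List.length_modify] using (hrow i' hi').1, ?_⟩
    intro j' hj'
    rw [getD_modify]
    split_ifs with hb
    · refine ⟨by simpa [List.length_modify] using ((hrow i' hi').2 j' hj').1, ?_⟩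
      intro k' hk'
      rw [getD_modify]
      split_ifs with hc
      · simpa [List.length_set] using (((hrow i' hi').2 j' hj').2 k' hk')
      · exact (((hrow i' hi').2 j' hj').2 k' hk')
    · exact (hrow i' hi').2 j' hj'
  · exact hrow i' hi'

lemma Sh4_replicate (N M : Nat) (v : Int) :
    Sh4 N M (List.replicate N (List.replicate M (List.replicate N (List.replicate M v)))) := by
  refine ⟨by simp, ?_⟩
  intro i hi
  rw [List.getD_replicate _ hi]
  refine ⟨by simp, ?_⟩
  intro j hj
  rw [List.getD_replicate _ hj]
  refine ⟨by simp, ?_⟩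
  intro k hk
  rw [List.getD_replicate _ hk]
  simp

lemma pvGet4_replicate (N M : Nat) (v : Int) {i j k1 k2 : Nat}
    (hi : i < N) (hj : j < M) (hk1 : k1 < N) (hk2 : k2 < M) :
    pvGet4 (List.replicate N (List.replicate M (List.replicate N (List.replicate M v))))
      i j k1 k2 = v := by
  unfold pvGet4
  rw [List.getD_replicate _ hi, List.getD_replicate _ hj, List.getD_replicate _ hk1,
    List.getD_replicate _ hk2]

-- ---- the min table computes rminS ----

def MInv (grid : List (List Int)) (N M : Nat) (t : List (List (List (List Int))))
    (k1 k2 i j : Nat) : Prop :=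
  Sh4 N M t ∧
  (∀ x < N, ∀ y < M, pvGet4 t x y 0 0 = pvG grid x y) ∧
  (∀ a b, a < N → b < M → (a < k1 ∨ (a = k1 ∧ b < k2)) →
    ∀ x y, x + a < N → y + b < M → pvGet4 t x y a b = rminS (pvG grid) x y a b) ∧
  (∀ x y, x + k1 < N → y + k2 < M → (x < i ∨ (x = i ∧ y < j)) →
    pvGet4 t x y k1 k2 = rminS (pvG grid) x y k1 k2)

lemma pvMin0_spec (grid : List (List Int)) (N M : Nat) :
    Sh4 N M (pvMin0 grid N M) ∧
    ∀ x, x < N → ∀ y, y < M → pvGet4 (pvMin0 grid N M) x y 0 0 = pvG grid x y := by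
  have H := range_foldl_inv
    (fun i t => Sh4 N M t ∧ ∀ x, x < i → ∀ y, y < M → pvGet4 t x y 0 0 = pvG grid x y)
    (fun t i => (List.range M).foldl (fun t j => pvSet4 t i j 0 0 (pvG grid i j)) t) N
    (by
      intro i t hi hs
      obtain ⟨hsh, hpre⟩ := hs
      have H2 := range_foldl_inv
        (fun j t => Sh4 N M t ∧ (∀ x, x < i → ∀ y, y < M → pvGet4 t x y 0 0 = pvG grid x y) ∧
          ∀ y, y < j → pvGet4 t i y 0 0 = pvG grid i y)
        (fun t j => pvSet4 t i j 0 0 (pvG grid i j)) M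
        (by
          intro jj t2 hjj hs2
          obtain ⟨hsh2, hpre2, hrow⟩ := hs2
          refine ⟨Sh4_set4 hsh2 _ _ _ _ _, ?_, ?_⟩
          · intro x hx y hy
            rw [pvGet4_set4_ne _ _ (fun hc => by omega)]
            exact hpre2 x hx y hy
          · intro y hy'
            by_cases hyj : y < jj
            · rw [pvGet4_set4_ne _ _ (fun hc => by omega)]
              exact hrow y hyj
            · have hy : y = jj := by omega
              subst hy
              rw [pvGet4_set4_self t2 _ hsh2 hi hjj (by omega) (by omega)])
        t ⟨hsh, hpre, fun y hy => absurd hy (by omega)⟩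
      refine ⟨H2.1, ?_⟩
      intro x hx y hy
      by_cases hxi : x < i
      · exact H2.2.1 x hxi y hy
      · have hx : x = i := by omega
        subst hx
        exact H2.2.2 y hy)
    (List.replicate N (List.replicate M (List.replicate N (List.replicate M ((2:Int)^31)))))
    ⟨Sh4_replicate N M _, fun x hx => absurd hx (by omega)⟩
  exact ⟨H.1, H.2⟩

lemma MInv_nexti (grid : List (List Int)) (N M : Nat) (t : List (List (List (List Int))))
    (k1 k2 i : Nat) (hk2 : k2 < M) (h : MInv grid N M t k1 k2 i (M - k2)) :
    MInv grid N M t k1 k2 (i+1) 0 := by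
  obtain ⟨hsh, hbase, hproc, hcur⟩ := h
  refine ⟨hsh, hbase, hproc, ?_⟩
  intro x y hx hy hlt
  exact hcur x y hx hy (by omega)

lemma MInv_nextk2 (grid : List (List Int)) (N M : Nat) (t : List (List (List (List Int))))
    (k1 k2 : Nat) (hk1 : k1 < N) (h : MInv grid N M t k1 k2 (N - k1) 0) :
    MInv grid N M t k1 (k2+1) 0 0 := by
  obtain ⟨hsh, hbase, hproc, hcur⟩ := h
  refine ⟨hsh, hbase, ?_, ?_⟩
  · intro a b ha hb hab x y hx hy
    by_cases hl : a < k1 ∨ (a = k1 ∧ b < k2)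
    · exact hproc a b ha hb hl x y hx hy
    · have hak : a = k1 := by omega
      have hbk : b = k2 := by omega
      subst hak; subst hbk
      exact hcur x y hx hy (by omega)
  · intro x y hx hy hlt
    exact absurd hlt (by omega)

lemma MInv_nextk1 (grid : List (List Int)) (N M : Nat) (t : List (List (List (List Int))))
    (k1 : Nat) (h : MInv grid N M t k1 M 0 0) : MInv grid N M t (k1+1) 0 0 0 := by
  obtain ⟨hsh, hbase, hproc, hcur⟩ := h
  refine ⟨hsh, hbase, ?_, ?_⟩
  · intro a b ha hb hab x y hx hy
    exact hproc a b ha hb (by omega) x y hx hy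
  · intro x y hx hy hlt
    exact absurd hlt (by omega)

lemma pvMinBody (grid : List (List Int)) (N M : Nat) (t : List (List (List (List Int))))
    (k1 k2 i j : Nat) (hk1 : k1 < N) (hk2 : k2 < M) (hi : i + k1 < N) (hj : j + k2 < M)
    (hinv : MInv grid N M t k1 k2 i j) :
    MInv grid N M
      (if k1 = 0 ∧ k2 = 0 then t
       else if k1 = 0 then
         pvSet4 t i j k1 k2 (min (pvGet4 t i j k1 (k2-1)) (pvG grid i (j+k2)))
       else if k2 = 0 then
         pvSet4 t i j k1 k2 (min (pvGet4 t i j (k1-1) k2) (pvG grid (i+k1) j))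
       else
         pvSet4 t i j k1 k2 (min (min (pvGet4 t i j (k1-1) k2) (pvGet4 t i j k1 (k2-1)))
           (pvG grid (i+k1) (j+k2))))
      k1 k2 i (j+1) := by
  obtain ⟨hsh, hbase, hproc, hcur⟩ := hinv
  have hiN : i < N := by omega
  have hjM : j < M := by omega
  by_cases h0 : k1 = 0 ∧ k2 = 0
  · rw [if_pos h0]
    refine ⟨hsh, hbase, hproc, ?_⟩
    intro x y hx hy hlt
    by_cases hold : x < i ∨ (x = i ∧ y < j)
    · exact hcur x y hx hy hold
    · have hxi : x = i := by omega
      have hyj : y = j := by omega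
      subst hxi; subst hyj
      obtain ⟨e1, e2⟩ := h0
      subst e1; subst e2
      rw [rminS_unfold]
      simp only [if_pos (⟨rfl, rfl⟩ : (0:Nat) = 0 ∧ (0:Nat) = 0)]
      exact hbase x (by omega) y (by omega)
  · rw [if_neg h0]
    by_cases h1 : k1 = 0
    · rw [if_pos h1]
      subst h1
      refine ⟨Sh4_set4 hsh _ _ _ _ _, ?_, ?_, ?_⟩
      · intro x hx y hy
        rw [pvGet4_set4_ne _ _ (fun hc => h0 ⟨rfl, hc.2.2.2⟩)]
        exact hbase x hx y hy
      · intro a b ha hb hab x y hx hy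
        rw [pvGet4_set4_ne _ _ (fun hc => by omega)]
        exact hproc a b ha hb hab x y hx hy
      · intro x y hx hy hlt
        by_cases hold : x < i ∨ (x = i ∧ y < j)
        · rw [pvGet4_set4_ne _ _ (fun hc => by omega)]
          exact hcur x y hx hy hold
        · have hxi : x = i := by omega
          have hyj : y = j := by omega
          subst hxi; subst hyj
          rw [pvGet4_set4_self t _ hsh hiN hjM hk1 hk2]
          have hread : pvGet4 t x y 0 (k2-1) = rminS (pvG grid) x y 0 (k2-1) :=
            hproc 0 (k2-1) (by omega) (by omega) (Or.inr ⟨rfl, by omega⟩) x y (by omega)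
              (by omega)
          rw [hread, rminS_unfold (pvG grid) x y 0 k2, if_neg h0, if_pos rfl]
    · rw [if_neg h1]
      by_cases h2 : k2 = 0
      · rw [if_pos h2]
        subst h2
        refine ⟨Sh4_set4 hsh _ _ _ _ _, ?_, ?_, ?_⟩
        · intro x hx y hy
          rw [pvGet4_set4_ne _ _ (fun hc => h1 hc.2.2.1)]
          exact hbase x hx y hy
        · intro a b ha hb hab x y hx hy
          rw [pvGet4_set4_ne _ _ (fun hc => by omega)]
          exact hproc a b ha hb hab x y hx hy
        · intro x y hx hy hlt
          by_cases hold : x < i ∨ (x = i ∧ y < j)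
          · rw [pvGet4_set4_ne _ _ (fun hc => by omega)]
            exact hcur x y hx hy hold
          · have hxi : x = i := by omega
            have hyj : y = j := by omega
            subst hxi; subst hyj
            rw [pvGet4_set4_self t _ hsh hiN hjM hk1 hk2]
            have hread : pvGet4 t x y (k1-1) 0 = rminS (pvG grid) x y (k1-1) 0 :=
              hproc (k1-1) 0 (by omega) (by omega) (Or.inl (by omega)) x y (by omega)
                (by omega)
            rw [hread, rminS_unfold (pvG grid) x y k1 0, if_neg h0, if_neg h1, if_pos rfl]
      · rw [if_neg h2]
        refine ⟨Sh4_set4 hsh _ _ _ _ _, ?_, ?_, ?_⟩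
        · intro x hx y hy
          rw [pvGet4_set4_ne _ _ (fun hc => h1 hc.2.2.1)]
          exact hbase x hx y hy
        · intro a b ha hb hab x y hx hy
          rw [pvGet4_set4_ne _ _ (fun hc => by omega)]
          exact hproc a b ha hb hab x y hx hy
        · intro x y hx hy hlt
          by_cases hold : x < i ∨ (x = i ∧ y < j)
          · rw [pvGet4_set4_ne _ _ (fun hc => by omega)]
            exact hcur x y hx hy hold
          · have hxi : x = i := by omega
            have hyj : y = j := by omega
            subst hxi; subst hyj
            rw [pvGet4_set4_self t _ hsh hiN hjM hk1 hk2]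
            have hr1 : pvGet4 t x y (k1-1) k2 = rminS (pvG grid) x y (k1-1) k2 :=
              hproc (k1-1) k2 (by omega) hk2 (Or.inl (by omega)) x y (by omega) (by omega)
            have hr2 : pvGet4 t x y k1 (k2-1) = rminS (pvG grid) x y k1 (k2-1) :=
              hproc k1 (k2-1) hk1 (by omega) (Or.inr ⟨rfl, by omega⟩) x y (by omega) (by omega)
            rw [hr1, hr2, rminS_unfold (pvG grid) x y k1 k2, if_neg h0, if_neg h1, if_neg h2]

lemma pvMinTab_spec (grid : List (List Int)) (N M : Nat) :
    Sh4 N M (pvMinTab grid N M) ∧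
    ∀ a b, a < N → b < M → ∀ x y, x + a < N → y + b < M →
      pvGet4 (pvMinTab grid N M) x y a b = rminS (pvG grid) x y a b := by
  have hmin0 := pvMin0_spec grid N M
  have H := range_foldl_inv
    (fun k1 t => MInv grid N M t k1 0 0 0)
    (fun t k1 =>
      (List.range M).foldl (fun t k2 =>
        (List.range (N - k1)).foldl (fun t i =>
          (List.range (M - k2)).foldl (fun t j =>
            if k1 = 0 ∧ k2 = 0 then t
            else if k1 = 0 then
              pvSet4 t i j k1 k2 (min (pvGet4 t i j k1 (k2-1)) (pvG grid i (j+k2)))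
            else if k2 = 0 then
              pvSet4 t i j k1 k2 (min (pvGet4 t i j (k1-1) k2) (pvG grid (i+k1) j))
            else
              pvSet4 t i j k1 k2 (min (min (pvGet4 t i j (k1-1) k2) (pvGet4 t i j k1 (k2-1)))
                (pvG grid (i+k1) (j+k2)))) t) t) t) N
    (by
      intro k1 t hk1 hinv
      have H2 := range_foldl_inv
        (fun k2 t => MInv grid N M t k1 k2 0 0)
        (fun t k2 =>
          (List.range (N - k1)).foldl (fun t i =>
            (List.range (M - k2)).foldl (fun t j =>
              if k1 = 0 ∧ k2 = 0 then t
              else if k1 = 0 then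
                pvSet4 t i j k1 k2 (min (pvGet4 t i j k1 (k2-1)) (pvG grid i (j+k2)))
              else if k2 = 0 then
                pvSet4 t i j k1 k2 (min (pvGet4 t i j (k1-1) k2) (pvG grid (i+k1) j))
              else
                pvSet4 t i j k1 k2 (min (min (pvGet4 t i j (k1-1) k2) (pvGet4 t i j k1 (k2-1)))
                  (pvG grid (i+k1) (j+k2)))) t) t) M
        (by
          intro k2 t hk2 hinv2
          have H3 := range_foldl_inv
            (fun i t => MInv grid N M t k1 k2 i 0)
            (fun t i =>
              (List.range (M - k2)).foldl (fun t j =>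
                if k1 = 0 ∧ k2 = 0 then t
                else if k1 = 0 then
                  pvSet4 t i j k1 k2 (min (pvGet4 t i j k1 (k2-1)) (pvG grid i (j+k2)))
                else if k2 = 0 then
                  pvSet4 t i j k1 k2 (min (pvGet4 t i j (k1-1) k2) (pvG grid (i+k1) j))
                else
                  pvSet4 t i j k1 k2
                    (min (min (pvGet4 t i j (k1-1) k2) (pvGet4 t i j k1 (k2-1)))
                    (pvG grid (i+k1) (j+k2)))) t) (N - k1)
            (by
              intro i t hi hinv3
              have H4 := range_foldl_inv
                (fun j t => MInv grid N M t k1 k2 i j)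
                (fun t j =>
                  if k1 = 0 ∧ k2 = 0 then t
                  else if k1 = 0 then
                    pvSet4 t i j k1 k2 (min (pvGet4 t i j k1 (k2-1)) (pvG grid i (j+k2)))
                  else if k2 = 0 then
                    pvSet4 t i j k1 k2 (min (pvGet4 t i j (k1-1) k2) (pvG grid (i+k1) j))
                  else
                    pvSet4 t i j k1 k2
                      (min (min (pvGet4 t i j (k1-1) k2) (pvGet4 t i j k1 (k2-1)))
                      (pvG grid (i+k1) (j+k2)))) (M - k2)
                (by
                  intro j t hj hinv4
                  exact pvMinBody grid N M t k1 k2 i j hk1 hk2 (by omega) (by omega) hinv4)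
                t hinv3
              exact MInv_nexti grid N M _ k1 k2 i hk2 H4)
            t hinv2
          exact MInv_nextk2 grid N M _ k1 k2 hk1 H3)
        t hinv
      exact MInv_nextk1 grid N M _ k1 H2)
    (pvMin0 grid N M)
    ⟨hmin0.1, hmin0.2, fun a b ha hb hab => absurd hab (by omega),
      fun x y hx hy hlt => absurd hlt (by omega)⟩
  exact ⟨H.1, fun a b ha hb x y hx hy => H.2.2.1 a b ha hb (Or.inl ha) x y hx hy⟩

-- ---- the t table computes bestS ----

def TInv (grid : List (List Int)) (N M : Nat) (t : List (List (List (List Int))))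
    (k1 k2 i j : Nat) : Prop :=
  Sh4 N M t ∧
  (∀ a b, a < N → b < M → (a < k1 ∨ (a = k1 ∧ b < k2)) →
    ∀ x y, x + a < N → y + b < M → pvGet4 t x y a b = bestS (pvG grid) x y a b) ∧
  (∀ x y, x + k1 < N → y + k2 < M → (x < i ∨ (x = i ∧ y < j)) →
    pvGet4 t x y k1 k2 = bestS (pvG grid) x y k1 k2) ∧
  (∀ a b, a < N → b < M → ¬ (a < k1 ∨ (a = k1 ∧ b < k2)) →
    ∀ x y, x + a < N → y + b < M →
      ¬ (a = k1 ∧ b = k2 ∧ (x < i ∨ (x = i ∧ y < j))) → pvGet4 t x y a b = 0)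

lemma TInv_nexti (grid : List (List Int)) (N M : Nat) (t : List (List (List (List Int))))
    (k1 k2 i : Nat) (hk2 : k2 < M) (h : TInv grid N M t k1 k2 i (M - k2)) :
    TInv grid N M t k1 k2 (i+1) 0 := by
  obtain ⟨hsh, hproc, hcur, hzero⟩ := h
  refine ⟨hsh, hproc, ?_, ?_⟩
  · intro x y hx hy hlt
    exact hcur x y hx hy (by omega)
  · intro a b ha hb hnl x y hx hy hnot
    exact hzero a b ha hb hnl x y hx hy (by omega)

lemma TInv_nextk2 (grid : List (List Int)) (N M : Nat) (t : List (List (List (List Int))))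
    (k1 k2 : Nat) (hk1 : k1 < N) (h : TInv grid N M t k1 k2 (N - k1) 0) :
    TInv grid N M t k1 (k2+1) 0 0 := by
  obtain ⟨hsh, hproc, hcur, hzero⟩ := h
  refine ⟨hsh, ?_, ?_, ?_⟩
  · intro a b ha hb hab x y hx hy
    by_cases hl : a < k1 ∨ (a = k1 ∧ b < k2)
    · exact hproc a b ha hb hl x y hx hy
    · have hak : a = k1 := by omega
      have hbk : b = k2 := by omega
      subst hak; subst hbk
      exact hcur x y hx hy (by omega)
  · intro x y hx hy hlt
    exact absurd hlt (by omega)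
  · intro a b ha hb hnl x y hx hy hnot
    exact hzero a b ha hb (by omega) x y hx hy (by omega)

lemma TInv_nextk1 (grid : List (List Int)) (N M : Nat) (t : List (List (List (List Int))))
    (k1 : Nat) (h : TInv grid N M t k1 M 0 0) : TInv grid N M t (k1+1) 0 0 0 := by
  obtain ⟨hsh, hproc, hcur, hzero⟩ := h
  refine ⟨hsh, ?_, ?_, ?_⟩
  · intro a b ha hb hab x y hx hy
    exact hproc a b ha hb (by omega) x y hx hy
  · intro x y hx hy hlt
    exact absurd hlt (by omega)
  · intro a b ha hb hnl x y hx hy hnot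
    exact hzero a b ha hb (by omega) x y hx hy (by omega)

lemma pvTBody (grid : List (List Int)) (N M : Nat) (mn t : List (List (List (List Int))))
    (k1 k2 i j : Nat) (hk1 : k1 < N) (hk2 : k2 < M) (hi : i + k1 < N) (hj : j + k2 < M)
    (hmn : ∀ a b, a < N → b < M → ∀ x y, x + a < N → y + b < M →
      pvGet4 mn x y a b = rminS (pvG grid) x y a b)
    (hinv : TInv grid N M t k1 k2 i j) :
    TInv grid N M
      (let t1 := (List.range k1).foldl (fun t x =>
        pvSet4 t i j k1 k2 (max (pvGet4 t i j k1 k2)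
          (pvGet4 t i j x k2 + pvGet4 t (i+x+1) j (k1-x-1) k2))) t
       let t2 := (List.range k2).foldl (fun t x =>
        pvSet4 t i j k1 k2 (max (pvGet4 t i j k1 k2)
          (pvGet4 t i j k1 x + pvGet4 t i (j+x+1) k1 (k2-x-1)))) t1
       if 0 < k1 ∨ 0 < k2 then
         pvSet4 t2 i j k1 k2 (pvGet4 t2 i j k1 k2 + pvGet4 mn i j k1 k2)
       else t2)
      k1 k2 i (j+1) := by
  obtain ⟨hsh, hproc, hcur, hzero⟩ := hinv
  have hiN : i < N := by omega
  have hjM : j < M := by omega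
  have hself : pvGet4 t i j k1 k2 = 0 := hzero k1 k2 hk1 hk2 (by omega) i j hi hj (by omega)
  by_cases hnz : 0 < k1 ∨ 0 < k2
  · have H1 := range_foldl_inv
      (fun x t' => Sh4 N M t' ∧
        (∀ a b c d, ¬ (a = i ∧ b = j ∧ c = k1 ∧ d = k2) →
          pvGet4 t' a b c d = pvGet4 t a b c d) ∧
        pvGet4 t' i j k1 k2 = (List.range x).foldl
          (fun v x => max v (bestS (pvG grid) i j x k2 +
            bestS (pvG grid) (i+x+1) j (k1-x-1) k2)) 0)
      (fun t x => pvSet4 t i j k1 k2 (max (pvGet4 t i j k1 k2)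
        (pvGet4 t i j x k2 + pvGet4 t (i+x+1) j (k1-x-1) k2))) k1
      (by
        intro x t' hx hs
        obtain ⟨hsh', hfr, hcell⟩ := hs
        have e1 : pvGet4 t' i j x k2 = bestS (pvG grid) i j x k2 := by
          rw [hfr i j x k2 (fun hc => by omega)]
          exact hproc x k2 (by omega) hk2 (Or.inl hx) i j (by omega) (by omega)
        have e2 : pvGet4 t' (i+x+1) j (k1-x-1) k2 = bestS (pvG grid) (i+x+1) j (k1-x-1) k2 := by
          rw [hfr (i+x+1) j (k1-x-1) k2 (fun hc => by omega)]
          exact hproc (k1-x-1) k2 (by omega) hk2 (Or.inl (by omega)) (i+x+1) j (by omega)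
            (by omega)
        refine ⟨Sh4_set4 hsh' _ _ _ _ _, ?_, ?_⟩
        · intro a b c d hne
          rw [pvGet4_set4_ne _ _
            (fun hc => hne ⟨hc.1.symm, hc.2.1.symm, hc.2.2.1.symm, hc.2.2.2.symm⟩)]
          exact hfr a b c d hne
        · rw [pvGet4_set4_self t' _ hsh' hiN hjM hk1 hk2, hcell, e1, e2, List.range_succ,
            List.foldl_append]
          simp only [List.foldl_cons, List.foldl_nil])
      t ⟨hsh, fun _ _ _ _ _ => rfl, by simpa using hself⟩
    have H2 := range_foldl_inv
      (fun x t' => Sh4 N M t' ∧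
        (∀ a b c d, ¬ (a = i ∧ b = j ∧ c = k1 ∧ d = k2) →
          pvGet4 t' a b c d = pvGet4 t a b c d) ∧
        pvGet4 t' i j k1 k2 = (List.range x).foldl
          (fun v x => max v (bestS (pvG grid) i j k1 x +
            bestS (pvG grid) i (j+x+1) k1 (k2-x-1)))
          ((List.range k1).foldl
            (fun v x => max v (bestS (pvG grid) i j x k2 +
              bestS (pvG grid) (i+x+1) j (k1-x-1) k2)) 0))
      (fun t x => pvSet4 t i j k1 k2 (max (pvGet4 t i j k1 k2)
        (pvGet4 t i j k1 x + pvGet4 t i (j+x+1) k1 (k2-x-1)))) k2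
      (by
        intro x t' hx hs
        obtain ⟨hsh', hfr, hcell⟩ := hs
        have e1 : pvGet4 t' i j k1 x = bestS (pvG grid) i j k1 x := by
          rw [hfr i j k1 x (fun hc => by omega)]
          exact hproc k1 x hk1 (by omega) (Or.inr ⟨rfl, hx⟩) i j (by omega) (by omega)
        have e2 : pvGet4 t' i (j+x+1) k1 (k2-x-1) = bestS (pvG grid) i (j+x+1) k1 (k2-x-1) := by
          rw [hfr i (j+x+1) k1 (k2-x-1) (fun hc => by omega)]
          exact hproc k1 (k2-x-1) hk1 (by omega) (Or.inr ⟨rfl, by omega⟩) i (j+x+1) (by omega)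
            (by omega)
        refine ⟨Sh4_set4 hsh' _ _ _ _ _, ?_, ?_⟩
        · intro a b c d hne
          rw [pvGet4_set4_ne _ _
            (fun hc => hne ⟨hc.1.symm, hc.2.1.symm, hc.2.2.1.symm, hc.2.2.2.symm⟩)]
          exact hfr a b c d hne
        · rw [pvGet4_set4_self t' _ hsh' hiN hjM hk1 hk2, hcell, e1, e2, List.range_succ,
            List.foldl_append]
          simp only [List.foldl_cons, List.foldl_nil])
      _ ⟨H1.1, H1.2.1, by
        simp only [List.range_zero, List.foldl_nil]
        exact H1.2.2⟩
    dsimp only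
    rw [if_pos hnz]
    have hval : pvGet4 ((List.range k2).foldl (fun t x =>
        pvSet4 t i j k1 k2 (max (pvGet4 t i j k1 k2)
          (pvGet4 t i j k1 x + pvGet4 t i (j+x+1) k1 (k2-x-1))))
        ((List.range k1).foldl (fun t x =>
          pvSet4 t i j k1 k2 (max (pvGet4 t i j k1 k2)
            (pvGet4 t i j x k2 + pvGet4 t (i+x+1) j (k1-x-1) k2))) t)) i j k1 k2 +
        pvGet4 mn i j k1 k2 = bestS (pvG grid) i j k1 k2 := by
      rw [H2.2.2, hmn k1 k2 hk1 hk2 i j hi hj, bestS_unfold (pvG grid) i j k1 k2, if_pos hnz]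
    refine ⟨Sh4_set4 H2.1 _ _ _ _ _, ?_, ?_, ?_⟩
    · intro a b ha hb hab x y hx hy
      rw [pvGet4_set4_ne _ _ (fun hc => by omega), H2.2.1 x y a b (fun hc => by omega)]
      exact hproc a b ha hb hab x y hx hy
    · intro x y hx hy hlt
      by_cases hold : x < i ∨ (x = i ∧ y < j)
      · rw [pvGet4_set4_ne _ _ (fun hc => by omega), H2.2.1 x y k1 k2 (fun hc => by omega)]
        exact hcur x y hx hy hold
      · have hxi : x = i := by omega
        have hyj : y = j := by omega
        subst hxi; subst hyj
        rw [pvGet4_set4_self _ _ H2.1 hiN hjM hk1 hk2]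
        exact hval
    · intro a b ha hb hnl x y hx hy hnot
      rw [pvGet4_set4_ne _ _ (fun hc => by omega), H2.2.1 x y a b (fun hc => by omega)]
      exact hzero a b ha hb hnl x y hx hy (by omega)
  · have hk10 : k1 = 0 := by omega
    have hk20 : k2 = 0 := by omega
    subst hk10; subst hk20
    simp only [List.range_zero, List.foldl_nil, if_neg hnz]
    refine ⟨hsh, hproc, ?_, ?_⟩
    · intro x y hx hy hlt
      by_cases hold : x < i ∨ (x = i ∧ y < j)
      · exact hcur x y hx hy hold
      · have hxi : x = i := by omega
        have hyj : y = j := by omega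
        subst hxi; subst hyj
        have h00 : pvGet4 t x y 0 0 = 0 :=
          hzero 0 0 (by omega) (by omega) (by omega) x y hx hy (by omega)
        rw [h00, bestS_unfold (pvG grid) x y 0 0,
          if_neg (by omega : ¬((0:Nat) < 0 ∨ (0:Nat) < 0))]
        simp
    · intro a b ha hb hnl x y hx hy hnot
      exact hzero a b ha hb hnl x y hx hy (by omega)

lemma pvTTab_spec (grid : List (List Int)) (N M : Nat)
    (hN : 0 < N) (hM : 0 < M) :
    ∀ a b, a < N → b < M → ∀ x y, x + a < N → y + b < M →
      pvGet4 (pvTTab grid N M (pvMinTab grid N M)) x y a b = bestS (pvG grid) x y a b := by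
  have hmn := (pvMinTab_spec grid N M).2
  unfold pvTTab
  generalize pvMinTab grid N M = mn at hmn ⊢
  have H := range_foldl_inv
    (fun k1 t => TInv grid N M t k1 0 0 0)
    (fun t k1 =>
      (List.range M).foldl (fun t k2 =>
        (List.range (N - k1)).foldl (fun t i =>
          (List.range (M - k2)).foldl (fun t j =>
            let t1 := (List.range k1).foldl (fun t x =>
              pvSet4 t i j k1 k2 (max (pvGet4 t i j k1 k2)
                (pvGet4 t i j x k2 + pvGet4 t (i+x+1) j (k1-x-1) k2))) t
            let t2 := (List.range k2).foldl (fun t x =>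
              pvSet4 t i j k1 k2 (max (pvGet4 t i j k1 k2)
                (pvGet4 t i j k1 x + pvGet4 t i (j+x+1) k1 (k2-x-1)))) t1
            if 0 < k1 ∨ 0 < k2 then
              pvSet4 t2 i j k1 k2 (pvGet4 t2 i j k1 k2 + pvGet4 mn i j k1 k2)
            else t2) t) t) t) N
    (by
      intro k1 t hk1 hinv
      have H2 := range_foldl_inv
        (fun k2 t => TInv grid N M t k1 k2 0 0)
        (fun t k2 =>
          (List.range (N - k1)).foldl (fun t i =>
            (List.range (M - k2)).foldl (fun t j =>
              let t1 := (List.range k1).foldl (fun t x =>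
                pvSet4 t i j k1 k2 (max (pvGet4 t i j k1 k2)
                  (pvGet4 t i j x k2 + pvGet4 t (i+x+1) j (k1-x-1) k2))) t
              let t2 := (List.range k2).foldl (fun t x =>
                pvSet4 t i j k1 k2 (max (pvGet4 t i j k1 k2)
                  (pvGet4 t i j k1 x + pvGet4 t i (j+x+1) k1 (k2-x-1)))) t1
              if 0 < k1 ∨ 0 < k2 then
                pvSet4 t2 i j k1 k2 (pvGet4 t2 i j k1 k2 + pvGet4 mn i j k1 k2)
              else t2) t) t) M
        (by
          intro k2 t hk2 hinv2
          have H3 := range_foldl_inv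
            (fun i t => TInv grid N M t k1 k2 i 0)
            (fun t i =>
              (List.range (M - k2)).foldl (fun t j =>
                let t1 := (List.range k1).foldl (fun t x =>
                  pvSet4 t i j k1 k2 (max (pvGet4 t i j k1 k2)
                    (pvGet4 t i j x k2 + pvGet4 t (i+x+1) j (k1-x-1) k2))) t
                let t2 := (List.range k2).foldl (fun t x =>
                  pvSet4 t i j k1 k2 (max (pvGet4 t i j k1 k2)
                    (pvGet4 t i j k1 x + pvGet4 t i (j+x+1) k1 (k2-x-1)))) t1
                if 0 < k1 ∨ 0 < k2 then
                  pvSet4 t2 i j k1 k2 (pvGet4 t2 i j k1 k2 + pvGet4 mn i j k1 k2)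
                else t2) t) (N - k1)
            (by
              intro i t hi hinv3
              have H4 := range_foldl_inv
                (fun j t => TInv grid N M t k1 k2 i j)
                (fun t j =>
                  let t1 := (List.range k1).foldl (fun t x =>
                    pvSet4 t i j k1 k2 (max (pvGet4 t i j k1 k2)
                      (pvGet4 t i j x k2 + pvGet4 t (i+x+1) j (k1-x-1) k2))) t
                  let t2 := (List.range k2).foldl (fun t x =>
                    pvSet4 t i j k1 k2 (max (pvGet4 t i j k1 k2)
                      (pvGet4 t i j k1 x + pvGet4 t i (j+x+1) k1 (k2-x-1)))) t1
                  if 0 < k1 ∨ 0 < k2 then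
                    pvSet4 t2 i j k1 k2 (pvGet4 t2 i j k1 k2 + pvGet4 mn i j k1 k2)
                  else t2) (M - k2)
                (by
                  intro j t hj hinv4
                  exact pvTBody grid N M mn t k1 k2 i j hk1 hk2 (by omega) (by omega)
                    hmn hinv4)
                t hinv3
              exact TInv_nexti grid N M _ k1 k2 i hk2 H4)
            t hinv2
          exact TInv_nextk2 grid N M _ k1 k2 hk1 H3)
        t hinv
      exact TInv_nextk1 grid N M _ k1 H2)
    (List.replicate N (List.replicate M (List.replicate N (List.replicate M (0:Int)))))
    ⟨Sh4_replicate N M 0,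
      fun a b ha hb hab => absurd hab (by omega),
      fun x y hx hy hlt => absurd hlt (by omega),
      fun a b ha hb hnl x y hx hy hnot =>
        pvGet4_replicate N M 0 (by omega) (by omega) ha hb⟩
  exact fun a b ha hb x y hx hy => H.2.1 a b ha hb (Or.inl ha) x y hx hy

-- ---- B's memoized recursions compute rminS / bestS ----

def MVal (grid : List (List Int)) (mm : PySem.Dict (Nat × Nat × Nat × Nat) Int) : Prop :=
  ∀ i j k1 k2 v, mm.get? (i, j, k1, k2) = some v → v = rminS (pvG grid) i j k1 k2

def BVal (grid : List (List Int)) (bm : PySem.Dict (Nat × Nat × Nat × Nat) Int) : Prop :=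
  ∀ i j k1 k2 v, bm.get? (i, j, k1, k2) = some v → v = bestS (pvG grid) i j k1 k2

lemma MVal_insert (grid : List (List Int)) (mm : PySem.Dict (Nat × Nat × Nat × Nat) Int)
    (hval : MVal grid mm) (i j k1 k2 : Nat) (v : Int)
    (hv : v = rminS (pvG grid) i j k1 k2) :
    MVal grid (mm.insert (i, j, k1, k2) v) := by
  intro a b c d w hw
  rw [PySem.Dict.get?_insert] at hw
  split_ifs at hw with hk
  · obtain ⟨h1, h2, h3, h4⟩ : a = i ∧ b = j ∧ c = k1 ∧ d = k2 := by simpa using hk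
    subst h1; subst h2; subst h3; subst h4
    cases hw
    exact hv
  · exact hval a b c d w hw

lemma BVal_insert (grid : List (List Int)) (bm : PySem.Dict (Nat × Nat × Nat × Nat) Int)
    (hval : BVal grid bm) (i j k1 k2 : Nat) (v : Int)
    (hv : v = bestS (pvG grid) i j k1 k2) :
    BVal grid (bm.insert (i, j, k1, k2) v) := by
  intro a b c d w hw
  rw [PySem.Dict.get?_insert] at hw
  split_ifs at hw with hk
  · obtain ⟨h1, h2, h3, h4⟩ : a = i ∧ b = j ∧ c = k1 ∧ d = k2 := by simpa using hk
    subst h1; subst h2; subst h3; subst h4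
    cases hw
    exact hv
  · exact hval a b c d w hw

lemma pvAltRmin_correct (grid : List (List Int)) :
    ∀ f i j k1 k2 mm, k1 + k2 < f → MVal grid mm →
      (pvAltRmin grid f mm i j k1 k2).1 = rminS (pvG grid) i j k1 k2 ∧
      MVal grid (pvAltRmin grid f mm i j k1 k2).2 := by
  intro f
  induction f with
  | zero => intro i j k1 k2 mm h hval; omega
  | succ f ih =>
    intro i j k1 k2 mm h hval
    rw [pvAltRmin]
    cases hg : mm.get? (i, j, k1, k2) with
    | some v => exact ⟨hval i j k1 k2 v hg, hval⟩
    | none =>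
      by_cases h0 : k1 = 0 ∧ k2 = 0
      · rw [if_pos h0]
        refine ⟨?_, MVal_insert grid mm hval i j k1 k2 _ ?_⟩ <;>
          · dsimp only
            rw [rminS_unfold (pvG grid) i j k1 k2, if_pos h0]
      · by_cases h1 : k1 = 0
        · have hr := ih i j 0 (k2-1) mm (by omega) hval
          rw [if_neg h0, if_pos h1]
          refine ⟨?_, MVal_insert grid _ hr.2 i j k1 k2 _ ?_⟩ <;>
            · dsimp only
              rw [hr.1, rminS_unfold (pvG grid) i j k1 k2, if_neg h0, if_pos h1]
        · by_cases h2 : k2 = 0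
          · have hr := ih i j (k1-1) 0 mm (by omega) hval
            rw [if_neg h0, if_neg h1, if_pos h2]
            refine ⟨?_, MVal_insert grid _ hr.2 i j k1 k2 _ ?_⟩ <;>
              · dsimp only
                rw [hr.1, rminS_unfold (pvG grid) i j k1 k2, if_neg h0, if_neg h1, if_pos h2]
          · have hr1 := ih i j (k1-1) k2 mm (by omega) hval
            have hr2 := ih i j k1 (k2-1) (pvAltRmin grid f mm i j (k1-1) k2).2 (by omega) hr1.2
            rw [if_neg h0, if_neg h1, if_neg h2]
            refine ⟨?_, MVal_insert grid _ hr2.2 i j k1 k2 _ ?_⟩ <;>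
              · dsimp only
                rw [hr1.1, hr2.1, rminS_unfold (pvG grid) i j k1 k2, if_neg h0, if_neg h1,
                  if_neg h2]

lemma pvAltBest_correct (grid : List (List Int)) :
    ∀ f i j k1 k2 bm mm, k1 + k2 < f → BVal grid bm → MVal grid mm →
      (pvAltBest grid f bm mm i j k1 k2).1 = bestS (pvG grid) i j k1 k2 ∧
      BVal grid (pvAltBest grid f bm mm i j k1 k2).2.1 ∧
      MVal grid (pvAltBest grid f bm mm i j k1 k2).2.2 := by
  intro f
  induction f with
  | zero => intro i j k1 k2 bm mm h hb hm; omega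
  | succ f ih =>
    intro i j k1 k2 bm mm h hb hm
    rw [pvAltBest]
    cases hg : bm.get? (i, j, k1, k2) with
    | some v => exact ⟨hb i j k1 k2 v hg, hb, hm⟩
    | none =>
      dsimp only
      have H1 := range_foldl_inv
        (fun x (s : Int × PySem.Dict (Nat × Nat × Nat × Nat) Int ×
            PySem.Dict (Nat × Nat × Nat × Nat) Int) =>
          s.1 = (List.range x).foldl
            (fun v x => max v (bestS (pvG grid) i j x k2 +
              bestS (pvG grid) (i+x+1) j (k1-x-1) k2)) 0 ∧
          BVal grid s.2.1 ∧ MVal grid s.2.2)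
        (fun s x => (max s.1 ((pvAltBest grid f s.2.1 s.2.2 i j x k2).1 + (pvAltBest grid f (pvAltBest grid f s.2.1 s.2.2 i j x k2).2.1 (pvAltBest grid f s.2.1 s.2.2 i j x k2).2.2 (i+x+1) j (k1-x-1) k2).1), (pvAltBest grid f (pvAltBest grid f s.2.1 s.2.2 i j x k2).2.1 (pvAltBest grid f s.2.1 s.2.2 i j x k2).2.2 (i+x+1) j (k1-x-1) k2).2.1, (pvAltBest grid f (pvAltBest grid f s.2.1 s.2.2 i j x k2).2.1 (pvAltBest grid f s.2.1 s.2.2 i j x k2).2.2 (i+x+1) j (k1-x-1) k2).2.2)) k1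
        (by
          intro x s hx hs
          obtain ⟨ha, hbv, hmv⟩ := hs
          have Ha := ih i j x k2 s.2.1 s.2.2 (by omega) hbv hmv
          have Hb := ih (i+x+1) j (k1-x-1) k2 _ _ (by omega) Ha.2.1 Ha.2.2
          refine ⟨?_, Hb.2.1, Hb.2.2⟩
          dsimp only
          rw [List.range_succ, List.foldl_append]
          simp only [List.foldl_cons, List.foldl_nil]
          rw [ha, Ha.1, Hb.1])
        ((0 : Int), bm, mm) ⟨by simp, hb, hm⟩
      have H2 := range_foldl_inv
        (fun x (s : Int × PySem.Dict (Nat × Nat × Nat × Nat) Int ×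
            PySem.Dict (Nat × Nat × Nat × Nat) Int) =>
          s.1 = (List.range x).foldl
            (fun v x => max v (bestS (pvG grid) i j k1 x +
              bestS (pvG grid) i (j+x+1) k1 (k2-x-1)))
            ((List.range k1).foldl
              (fun v x => max v (bestS (pvG grid) i j x k2 +
                bestS (pvG grid) (i+x+1) j (k1-x-1) k2)) 0) ∧
          BVal grid s.2.1 ∧ MVal grid s.2.2)
        (fun s x => (max s.1 ((pvAltBest grid f s.2.1 s.2.2 i j k1 x).1 + (pvAltBest grid f (pvAltBest grid f s.2.1 s.2.2 i j k1 x).2.1 (pvAltBest grid f s.2.1 s.2.2 i j k1 x).2.2 i (j+x+1) k1 (k2-x-1)).1), (pvAltBest grid f (pvAltBest grid f s.2.1 s.2.2 i j k1 x).2.1 (pvAltBest grid f s.2.1 s.2.2 i j k1 x).2.2 i (j+x+1) k1 (k2-x-1)).2.1, (pvAltBest grid f (pvAltBest grid f s.2.1 s.2.2 i j k1 x).2.1 (pvAltBest grid f s.2.1 s.2.2 i j k1 x).2.2 i (j+x+1) k1 (k2-x-1)).2.2)) k2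
        (by
          intro x s hx hs
          obtain ⟨ha, hbv, hmv⟩ := hs
          have Ha := ih i j k1 x s.2.1 s.2.2 (by omega) hbv hmv
          have Hb := ih i (j+x+1) k1 (k2-x-1) _ _ (by omega) Ha.2.1 Ha.2.2
          refine ⟨?_, Hb.2.1, Hb.2.2⟩
          dsimp only
          rw [List.range_succ, List.foldl_append]
          simp only [List.foldl_cons, List.foldl_nil]
          rw [ha, Ha.1, Hb.1])
        _ ⟨H1.1, H1.2.1, H1.2.2⟩
      by_cases hnz : 0 < k1 ∨ 0 < k2
      · rw [if_pos hnz]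
        have hrm := pvAltRmin_correct grid (k1+k2+1) i j k1 k2 _ (by omega) H2.2.2
        refine ⟨?_, BVal_insert grid _ H2.2.1 i j k1 k2 _ ?_, hrm.2⟩ <;>
          · rw [H2.1, hrm.1, bestS_unfold (pvG grid) i j k1 k2, if_pos hnz]
      · rw [if_neg hnz]
        refine ⟨?_, BVal_insert grid _ H2.2.1 i j k1 k2 _ ?_, H2.2.2⟩ <;>
          · rw [H2.1, bestS_unfold (pvG grid) i j k1 k2, if_neg hnz]

-- ===== VERDICT (by name: the statement is the Claim_ definition above) =====
theorem solveGC2017_spec : Claim_equal_solveGC2017 := by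
  intro n m grid _ hpre
  unfold Spec_solveGC2017 solveGC2017 solveGC2017_alt
  obtain ⟨hn, hm, _, _⟩ := hpre
  have hN : 0 < n.toNat := by omega
  have hM : 0 < m.toNat := by omega
  have hA := (pvTTab_spec grid n.toNat m.toNat hN hM) (n.toNat - 1) (m.toNat - 1)
    (by omega) (by omega) 0 0 (by omega) (by omega)
  have hB := (pvAltBest_correct grid ((n.toNat - 1) + (m.toNat - 1) + 1) 0 0
    (n.toNat - 1) (m.toNat - 1) PySem.Dict.empty PySem.Dict.empty (by omega)
    (by intro i j k1 k2 v h; rw [PySem.Dict.get?_empty] at h; exact absurd h (by simp))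
    (by intro i j k1 k2 v h; rw [PySem.Dict.get?_empty] at h; exact absurd h (by simp))).1
  rw [hA, hB]
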